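-- pv_equiv track=rewrite | github.com/txetxedeletxe/Collatz | importantNumbersUpAndDown.py | upOrDown
-- ===== SOURCE A (Python) =====
-- def distance(x,y):
--     flip = 0
--     tempx = x
--     i = 0
--     if (x % 6 == 1):
--         flip = 4
--     else:
--         flip = 2
--
--     while tempx != y:
--         i+=1
--         tempx+=flip
--         if flip == 2:
--             flip =4
--         else:
--             flip = 2
--
--     return i
--
-- def upOrDown(x):
--     temp = x
--     temp = temp*3+1
--     while temp % 2 == 0:
--         temp = temp // 2
--
--     if (temp > x):
--         return "up x" + str(distance(x,temp)) + ", to: " + str(temp)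
--     else:
--         return "down x" + str(distance(temp,x))+ ", to: " + str(temp)
-- ===== SOURCE B (Python) =====
-- def upOrDown(x):
--     t = x * 3 + 1
--     while t % 2 == 0:
--         t //= 2
--     lo, hi = (x, t) if t > x else (t, x)
--     d = (hi + 5) // 6 + (hi + 1) // 6 - (lo + 5) // 6 - (lo + 1) // 6
--     if t > x:
--         return "up x" + str(d) + ", to: " + str(t)
--     return "down x" + str(d) + ", to: " + str(t)
-- ===== Notes on version B (the rewrite author's own statement) =====
-- stated objective: alternative
-- what changed: B replaces A's distance() loop, which walks from the lower to the upper odd value in alternating +2/+4 steps, by a closed-form count of the integers congruent to 1 or 5 mod 6 in the interval (two floor divisions per endpoint); the step loop disappears entirely.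
-- outside the precondition, e.g. on upOrDown(-3): A returns 'up x1, to: -1', B returns 'up x1, to: -1'
import Mathlib
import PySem

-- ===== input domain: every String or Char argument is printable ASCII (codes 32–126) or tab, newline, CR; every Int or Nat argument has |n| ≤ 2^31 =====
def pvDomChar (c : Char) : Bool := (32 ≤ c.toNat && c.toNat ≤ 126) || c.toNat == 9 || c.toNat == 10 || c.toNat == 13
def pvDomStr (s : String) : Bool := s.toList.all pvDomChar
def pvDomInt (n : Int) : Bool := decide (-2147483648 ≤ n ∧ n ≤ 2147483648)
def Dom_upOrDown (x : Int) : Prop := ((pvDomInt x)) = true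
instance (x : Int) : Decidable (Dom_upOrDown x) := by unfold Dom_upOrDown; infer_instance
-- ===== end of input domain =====

-- B replaces A's step-by-step alternating +2/+4 walk in distance() by a closed-form
-- count of the integers ≡ 1, 5 (mod 6) in the interval (objective: alternative).


-- ===== PORT A =====
-- the 'while temp % 2 == 0: temp //= 2' loop (identical lines in A and in B, shared
-- helper); fuel t.natAbs suffices: |t| at least halves each iteration
def stripTwos : Nat → Int → Int
  | 0, t => t
  | f+1, t => if PySem.Int.mod t 2 = 0 then stripTwos f (PySem.Int.floordiv t 2) else t

-- the body of A's 'while tempx != y' loop; fuel is only consumed on an iteration, and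
-- (y - x).toNat + 1 iterations suffice whenever the Python loop terminates (each step adds ≥ 2)
def distanceAux : Nat → Int → Int → Int → Int → Int
  | 0, _, _, _, i => i
  | f+1, flip, tempx, y, i =>
      if tempx = y then i
      else distanceAux f (if flip = 2 then 4 else 2) (tempx + flip) y (i + 1)

def distance (x y : Int) : Int :=
  distanceAux ((y - x).toNat + 1) (if PySem.Int.mod x 6 = 1 then 4 else 2) x y 0

def upOrDown (x : Int) : String :=
  let temp := stripTwos (x * 3 + 1).natAbs (x * 3 + 1)
  if temp > x then
    "up x" ++ PySem.Int.toStr (distance x temp) ++ ", to: " ++ PySem.Int.toStr temp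
  else
    "down x" ++ PySem.Int.toStr (distance temp x) ++ ", to: " ++ PySem.Int.toStr temp

-- ===== PORT B =====
def upOrDown_alt (x : Int) : String :=
  let t := stripTwos (x * 3 + 1).natAbs (x * 3 + 1)
  let lo := if t > x then x else t
  let hi := if t > x then t else x
  let d := PySem.Int.floordiv (hi + 5) 6 + PySem.Int.floordiv (hi + 1) 6
           - PySem.Int.floordiv (lo + 5) 6 - PySem.Int.floordiv (lo + 1) 6
  if t > x then "up x" ++ PySem.Int.toStr d ++ ", to: " ++ PySem.Int.toStr t
  else "down x" ++ PySem.Int.toStr d ++ ", to: " ++ PySem.Int.toStr t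

-- ===== PRECONDITION & SPEC =====
-- Pre_ excludes the inputs on which A's distance() loop never terminates: all even x,
-- and multiples of 3 except the positive x ≡ 3 (mod 12) (on which the loop does
-- terminate and is matched).  Among negative x ≡ 3 (mod 6) sporadic values such as
-- x = -3 also terminate (with B returning the same value there), but their termination
-- condition has no closed form, so they are excluded too.
def Pre_upOrDown (x : Int) : Prop := x % 6 = 1 ∨ x % 6 = 5 ∨ (0 < x ∧ x % 12 = 3)
instance (x : Int) : Decidable (Pre_upOrDown x) := by unfold Pre_upOrDown; infer_instance

def pvWitness_upOrDown : Int := 7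

def Spec_upOrDown (x : Int) (out : String) : Prop := out = upOrDown_alt x
instance (x : Int) (out : String) : Decidable (Spec_upOrDown x out) := by unfold Spec_upOrDown; infer_instance

-- ===== CLAIM (what is proved, stated in full; the proofs are below) =====
def Claim_equal_upOrDown : Prop := ∀ (x : Int), Dom_upOrDown x → Pre_upOrDown x → Spec_upOrDown x (upOrDown x)

-- ===== LEMMAS AND PROOFS =====

-- accumulator shift for A's loop counter
lemma distanceAux_shift (f : Nat) : ∀ (flip a b i : Int),
    distanceAux f flip a b i = i + distanceAux f flip a b 0 := by
  induction f with
  | zero => intro flip a b i; simp [distanceAux]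
  | succ f ih =>
      intro flip a b i
      by_cases h : a = b
      · simp [distanceAux, h]
      · simp only [distanceAux, if_neg h]
        rw [ih _ _ _ (i + 1), ih _ _ _ (0 + 1)]
        omega

-- the walk invariant: from a state (tempx, flip) on one of the two alternating chains
-- that can reach b, the loop counts exactly the integers ≡ 1, 5 (mod 6) in (tempx, b]
lemma distanceAux_walk (b : Int) : ∀ (f : Nat) (a flip : Int), a ≤ b → (b - a).toNat < f →
    ((((a % 6 = 1 ∧ flip = 4) ∨ (a % 6 = 5 ∧ flip = 2)) ∧ (b % 6 = 1 ∨ b % 6 = 5)) ∨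
     (((a % 6 = 3 ∧ flip = 2) ∨ (a % 6 = 5 ∧ flip = 4)) ∧ b % 6 = 5)) →
    distanceAux f flip a b 0 =
      (b + 5) / 6 + (b + 1) / 6 - (a + 5) / 6 - (a + 1) / 6 := by
  intro f
  induction f with
  | zero => intro a flip hab hf _; omega
  | succ f ih =>
      intro a flip hab hf hst
      by_cases h : a = b
      · subst h; simp [distanceAux]
      · have hlt : a < b := lt_of_le_of_ne hab h
        simp only [distanceAux, if_neg h]
        rw [distanceAux_shift]
        rcases hst with ⟨hA | hA, hb⟩ | ⟨hA | hA, hb⟩ <;> obtain ⟨ha, hfl⟩ := hA <;> subst hfl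
        · -- (a ≡ 1, flip = 4), canonical chain
          have hstep : a + 4 ≤ b := by omega
          rw [if_neg (by norm_num), ih (a + 4) 2 hstep (by omega)
            (Or.inl ⟨Or.inr ⟨by omega, rfl⟩, hb⟩)]
          omega
        · -- (a ≡ 5, flip = 2), canonical chain
          have hstep : a + 2 ≤ b := by omega
          rw [if_pos rfl, ih (a + 2) 4 hstep (by omega)
            (Or.inl ⟨Or.inl ⟨by omega, rfl⟩, hb⟩)]
          omega
        · -- (a ≡ 3, flip = 2), shifted chain (only reaches b ≡ 5)
          have hstep : a + 2 ≤ b := by omega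
          rw [if_pos rfl, ih (a + 2) 4 hstep (by omega)
            (Or.inr ⟨Or.inr ⟨by omega, rfl⟩, hb⟩)]
          omega
        · -- (a ≡ 5, flip = 4), shifted chain
          have hstep : a + 4 ≤ b := by omega
          rw [if_neg (by norm_num), ih (a + 4) 2 hstep (by omega)
            (Or.inr ⟨Or.inl ⟨by omega, rfl⟩, hb⟩)]
          omega

lemma stripTwos_of_odd (f : Nat) (t : Int) (h : t % 2 = 1) : stripTwos f t = t := by
  cases f with
  | zero => rfl
  | succ f =>
      have hne : ¬ PySem.Int.mod t 2 = 0 := by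
        rw [PySem.Int.mod_eq_emod_of_pos (by norm_num)]; omega
      simp only [stripTwos, if_neg hne]

lemma stripTwos_odd3 : ∀ (f : Nat) (t : Int), t ≠ 0 → t.natAbs ≤ f → t % 3 ≠ 0 →
    (stripTwos f t) % 2 = 1 ∧ (stripTwos f t) % 3 ≠ 0 := by
  intro f
  induction f with
  | zero => intro t h0 hf _; omega
  | succ f ih =>
      intro t h0 hf h3
      by_cases he : PySem.Int.mod t 2 = 0
      · have he' : t % 2 = 0 := by
          rwa [PySem.Int.mod_eq_emod_of_pos (by norm_num)] at he
        rw [show stripTwos (f+1) t = stripTwos f (PySem.Int.floordiv t 2) by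
              simp only [stripTwos, if_pos he],
            PySem.Int.floordiv_eq_ediv_of_pos (by norm_num)]
        exact ih (t / 2) (by omega) (by omega) (by omega)
      · have he' : t % 2 = 1 := by
          rw [PySem.Int.mod_eq_emod_of_pos (by norm_num)] at he; omega
        rw [show stripTwos (f+1) t = t by simp only [stripTwos, if_neg he]]
        exact ⟨he', h3⟩

-- A's distance on the canonical chains (both endpoints ≡ 1, 5 mod 6)
lemma distance_eq (a b : Int) (hab : a ≤ b) (ha : a % 6 = 1 ∨ a % 6 = 5)
    (hb : b % 6 = 1 ∨ b % 6 = 5) :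
    distance a b = (b + 5) / 6 + (b + 1) / 6 - (a + 5) / 6 - (a + 1) / 6 := by
  unfold distance
  rw [PySem.Int.mod_eq_emod_of_pos (by norm_num)]
  rcases ha with h | h
  · rw [if_pos h]
    exact distanceAux_walk b _ a 4 hab (by omega) (Or.inl ⟨Or.inl ⟨h, rfl⟩, hb⟩)
  · rw [if_neg (by omega)]
    exact distanceAux_walk b _ a 2 hab (by omega) (Or.inl ⟨Or.inr ⟨h, rfl⟩, hb⟩)

-- A's distance on the shifted chain (start ≡ 3, target ≡ 5 mod 6)
lemma distance_eq_shifted (a b : Int) (hab : a ≤ b) (ha : a % 6 = 3) (hb : b % 6 = 5) :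
    distance a b = (b + 5) / 6 + (b + 1) / 6 - (a + 5) / 6 - (a + 1) / 6 := by
  unfold distance
  rw [PySem.Int.mod_eq_emod_of_pos (by norm_num), if_neg (by omega)]
  exact distanceAux_walk b _ a 2 hab (by omega) (Or.inr ⟨Or.inl ⟨ha, rfl⟩, hb⟩)

-- ===== VERDICT (by name: the statement is the Claim_ definition above) =====
theorem upOrDown_spec : Claim_equal_upOrDown := by
  intro x _ hpre
  unfold Spec_upOrDown upOrDown upOrDown_alt
  dsimp only
  have hbridge : ∀ n : Int, PySem.Int.floordiv n 6 = n / 6 := fun n =>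
    PySem.Int.floordiv_eq_ediv_of_pos (by norm_num)
  set t0 : Int := x * 3 + 1 with ht0
  have h30 : t0 % 3 = 1 := by omega
  set temp : Int := stripTwos t0.natAbs t0 with htemp
  rcases hpre with h15 | h15 | ⟨hxpos, h123⟩
  · -- x ≡ 1 (mod 6)
    have hT := stripTwos_odd3 t0.natAbs t0 (by omega) le_rfl (by omega)
    rw [← htemp] at hT
    have ht6 : temp % 6 = 1 ∨ temp % 6 = 5 := by omega
    by_cases hgt : temp > x
    · simp only [if_pos hgt, hbridge]
      rw [distance_eq x temp (le_of_lt hgt) (Or.inl h15) ht6]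
    · simp only [if_neg hgt, hbridge]
      rw [distance_eq temp x (by omega) ht6 (Or.inl h15)]
  · -- x ≡ 5 (mod 6)
    have hT := stripTwos_odd3 t0.natAbs t0 (by omega) le_rfl (by omega)
    rw [← htemp] at hT
    have ht6 : temp % 6 = 1 ∨ temp % 6 = 5 := by omega
    by_cases hgt : temp > x
    · simp only [if_pos hgt, hbridge]
      rw [distance_eq x temp (le_of_lt hgt) (Or.inr h15) ht6]
    · simp only [if_neg hgt, hbridge]
      rw [distance_eq temp x (by omega) ht6 (Or.inr h15)]
  · -- 0 < x, x ≡ 3 (mod 12): exactly one halving, temp = (3x+1)/2 ≡ 5 (mod 6)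
    have hev : t0 % 2 = 0 := by omega
    have hodd : (t0 / 2) % 2 = 1 := by omega
    obtain ⟨n, hn⟩ : ∃ n, t0.natAbs = n + 1 := ⟨t0.natAbs - 1, by omega⟩
    have htval : temp = t0 / 2 := by
      rw [htemp, hn]
      have he : PySem.Int.mod t0 2 = 0 := by
        rw [PySem.Int.mod_eq_emod_of_pos (by norm_num)]; exact hev
      rw [show stripTwos (n+1) t0 = stripTwos n (PySem.Int.floordiv t0 2) by
            simp only [stripTwos, if_pos he],
          PySem.Int.floordiv_eq_ediv_of_pos (by norm_num)]
      exact stripTwos_of_odd n _ hodd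
    have ht6 : temp % 6 = 5 := by omega
    have hgt : temp > x := by omega
    simp only [if_pos hgt, hbridge]
    rw [distance_eq_shifted x temp (le_of_lt hgt) (by omega) ht6]
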